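-- pv_equiv track=rewrite | github.com/juuck14/dominion | dominion/ai/heuristic.py | choose_card_from_supply
-- ===== SOURCE A (Python) =====
-- def choose_card_from_supply(
--
--     player_index: int,
--     available_cards: list[str],
--     prompt: str,
-- ) -> str | None:
--     _ = (player_index, prompt)
--     if not available_cards:
--         return None
--     preferred = ["Silver", "Village", "Smithy", "Workshop", "Estate", "Copper"]
--     for card_name in preferred:
--         if card_name in available_cards:
--             return card_name
--     return available_cards[0]
-- ===== SOURCE B (Python) =====
-- def choose_card_from_supply(
--     player_index: int,
--     available_cards: list[str],
--     prompt: str,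
-- ):
--     _ = (player_index, prompt)
--     if not available_cards:
--         return None
--     preferred = ["Silver", "Village", "Smithy", "Workshop", "Estate", "Copper"]
--     priority = {name: i for i, name in enumerate(preferred)}
--     return min(available_cards, key=lambda c: priority.get(c, len(preferred)))
-- ===== Notes on version B (the rewrite author's own statement) =====
-- stated objective: idiomatic
-- what changed: Replaces the loop over the preference list with membership scans by a priority index dict and a single first-stable min over available_cards.
import Mathlib
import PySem

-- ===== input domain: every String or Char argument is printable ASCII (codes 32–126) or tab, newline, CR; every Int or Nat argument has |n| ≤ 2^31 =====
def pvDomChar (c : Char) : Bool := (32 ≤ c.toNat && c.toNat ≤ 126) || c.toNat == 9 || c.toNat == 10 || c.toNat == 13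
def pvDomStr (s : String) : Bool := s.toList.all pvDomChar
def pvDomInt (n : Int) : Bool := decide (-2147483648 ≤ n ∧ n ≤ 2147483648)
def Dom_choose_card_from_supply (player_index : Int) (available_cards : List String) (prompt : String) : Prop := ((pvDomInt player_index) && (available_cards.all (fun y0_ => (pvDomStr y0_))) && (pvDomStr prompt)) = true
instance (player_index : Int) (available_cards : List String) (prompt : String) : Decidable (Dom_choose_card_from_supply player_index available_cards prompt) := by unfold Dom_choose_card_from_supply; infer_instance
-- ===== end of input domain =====

-- B replaces A's scan of the preference list (a membership test per preferred name) by a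
-- priority-index dict and one first-stable min over available_cards (objective: idiomatic).

-- ===== PORT A =====
-- the 'for card_name in preferred: if card_name in available_cards: return card_name' loop
def findPreferredA : List String → List String → Option String
  | [], _ => none
  | c :: rest, ac => if ac.contains c then some c else findPreferredA rest ac

def choose_card_from_supply (player_index : Int) (available_cards : List String) (prompt : String) : Option String :=
  if available_cards.isEmpty then none
  else
    match findPreferredA ["Silver", "Village", "Smithy", "Workshop", "Estate", "Copper"] available_cards with
    | some c => some c
    | none => PySem.List.pyGet? available_cards 0

-- ===== PORT B =====
def choose_card_from_supply_alt (player_index : Int) (available_cards : List String) (prompt : String) : Option String :=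
  if available_cards.isEmpty then none
  else
    let preferred : List String := ["Silver", "Village", "Smithy", "Workshop", "Estate", "Copper"]
    let priority : PySem.Dict String Int :=
      (PySem.List.enumerate preferred).foldl (fun d p => d.insert p.2 p.1) PySem.Dict.empty
    PySem.List.min? available_cards (fun c => priority.getD c (preferred.length : Int))

-- ===== PRECONDITION & SPEC =====
def Spec_choose_card_from_supply (player_index : Int) (available_cards : List String) (prompt : String) (out : Option String) : Prop := out = choose_card_from_supply_alt player_index available_cards prompt
instance (player_index : Int) (available_cards : List String) (prompt : String) (out : Option String) : Decidable (Spec_choose_card_from_supply player_index available_cards prompt out) := by unfold Spec_choose_card_from_supply; infer_instance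

-- ===== CLAIM (what is proved, stated in full; the proofs are below) =====
def Claim_equal_choose_card_from_supply : Prop := ∀ (player_index : Int) (available_cards : List String) (prompt : String), Dom_choose_card_from_supply player_index available_cards prompt → Spec_choose_card_from_supply player_index available_cards prompt (choose_card_from_supply player_index available_cards prompt)

-- ===== LEMMAS AND PROOFS =====

-- B's key function, named for the proofs
def pvKeyB (c : String) : Int :=
  ((PySem.List.enumerate (["Silver", "Village", "Smithy", "Workshop", "Estate", "Copper"] : List String)).foldl
      (fun d p => d.insert p.2 p.1) PySem.Dict.empty).getD c 6

theorem alt_eq (player_index : Int) (available_cards : List String) (prompt : String) :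
    choose_card_from_supply_alt player_index available_cards prompt =
      if available_cards.isEmpty then none else PySem.List.min? available_cards pvKeyB := rfl

theorem pvKeyB_eq (y : String) :
    pvKeyB y = if y = "Copper" then 5 else if y = "Estate" then 4 else if y = "Workshop" then 3
      else if y = "Smithy" then 2 else if y = "Village" then 1 else if y = "Silver" then 0 else 6 := by
  simp [pvKeyB, PySem.List.enumerate_cons, PySem.List.enumerate_nil, List.foldl,
    PySem.Dict.getD_insert, PySem.Dict.getD_empty]

-- first-stability of min?: the accumulator survives if nothing beats it strictly
theorem min_foldl_const {α : Type} (key : α → Int) (t : List α) (m : α)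
    (h : ∀ y ∈ t, ¬ key y < key m) :
    t.foldl (fun acc x => match acc with
      | none => some x
      | some m' => if key x < key m' then some x else some m') (some m) = some m := by
  induction t with
  | nil => rfl
  | cons y t ih =>
    simp only [List.foldl_cons]
    rw [if_neg (h y (by simp))]
    exact ih (fun z hz => h z (by simp [hz]))

theorem min?_cons_of_le {α : Type} (key : α → Int) (x : α) (t : List α)
    (h : ∀ y ∈ t, key x ≤ key y) :
    PySem.List.min? (x :: t) key = some x := by
  show List.foldl _ none (x :: t) = some x
  simp only [List.foldl_cons]
  exact min_foldl_const key t x (fun y hy => not_lt.mpr (h y hy))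

-- ===== VERDICT (by name: the statement is the Claim_ definition above) =====
theorem choose_card_from_supply_spec : Claim_equal_choose_card_from_supply := by
  intro player_index ac prompt _
  show choose_card_from_supply player_index ac prompt = choose_card_from_supply_alt player_index ac prompt
  rw [alt_eq]
  cases ac with
  | nil => rfl
  | cons x t =>
    have hne : PySem.List.min? (x :: t) pvKeyB ≠ none := by
      simp [PySem.List.min?_eq_none_iff]
    obtain ⟨m, hm⟩ := Option.ne_none_iff_exists'.mp hne
    have hmem : m ∈ x :: t := PySem.List.min?_mem hm
    have hmin : ∀ y ∈ x :: t, pvKeyB m ≤ pvKeyB y := PySem.List.min?_isMin hm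
    simp only [choose_card_from_supply, List.isEmpty_cons, if_neg, Bool.false_eq_true,
      not_false_eq_true, findPreferredA, hm]
    split_ifs with h0 h1 h2 h3 h4 h5
    · -- "Silver" is the first preferred card present
      have hle : pvKeyB m ≤ 0 := by
        have := hmin "Silver" (by simpa using h0)
        simpa [pvKeyB_eq] using this
      have hk := pvKeyB_eq m
      split_ifs at hk with e5 e4 e3 e2 e1 e0
      · omega
      · omega
      · omega
      · omega
      · omega
      · subst e0; rfl
      · omega
    · -- "Village" is the first preferred card present
      have hle : pvKeyB m ≤ 1 := by
        have := hmin "Village" (by simpa using h1)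
        simpa [pvKeyB_eq] using this
      have hk := pvKeyB_eq m
      split_ifs at hk with e5 e4 e3 e2 e1 e0
      · omega
      · omega
      · omega
      · omega
      · subst e1; rfl
      · exact absurd (e0 ▸ hmem) (by simpa using h0)
      · omega
    · -- "Smithy" is the first preferred card present
      have hle : pvKeyB m ≤ 2 := by
        have := hmin "Smithy" (by simpa using h2)
        simpa [pvKeyB_eq] using this
      have hk := pvKeyB_eq m
      split_ifs at hk with e5 e4 e3 e2 e1 e0
      · omega
      · omega
      · omega
      · subst e2; rfl
      · exact absurd (e1 ▸ hmem) (by simpa using h1)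
      · exact absurd (e0 ▸ hmem) (by simpa using h0)
      · omega
    · -- "Workshop" is the first preferred card present
      have hle : pvKeyB m ≤ 3 := by
        have := hmin "Workshop" (by simpa using h3)
        simpa [pvKeyB_eq] using this
      have hk := pvKeyB_eq m
      split_ifs at hk with e5 e4 e3 e2 e1 e0
      · omega
      · omega
      · subst e3; rfl
      · exact absurd (e2 ▸ hmem) (by simpa using h2)
      · exact absurd (e1 ▸ hmem) (by simpa using h1)
      · exact absurd (e0 ▸ hmem) (by simpa using h0)
      · omega
    · -- "Estate" is the first preferred card present
      have hle : pvKeyB m ≤ 4 := by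
        have := hmin "Estate" (by simpa using h4)
        simpa [pvKeyB_eq] using this
      have hk := pvKeyB_eq m
      split_ifs at hk with e5 e4 e3 e2 e1 e0
      · omega
      · subst e4; rfl
      · exact absurd (e3 ▸ hmem) (by simpa using h3)
      · exact absurd (e2 ▸ hmem) (by simpa using h2)
      · exact absurd (e1 ▸ hmem) (by simpa using h1)
      · exact absurd (e0 ▸ hmem) (by simpa using h0)
      · omega
    · -- "Copper" is the first preferred card present
      have hle : pvKeyB m ≤ 5 := by
        have := hmin "Copper" (by simpa using h5)
        simpa [pvKeyB_eq] using this
      have hk := pvKeyB_eq m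
      split_ifs at hk with e5 e4 e3 e2 e1 e0
      · subst e5; rfl
      · exact absurd (e4 ▸ hmem) (by simpa using h4)
      · exact absurd (e3 ▸ hmem) (by simpa using h3)
      · exact absurd (e2 ▸ hmem) (by simpa using h2)
      · exact absurd (e1 ▸ hmem) (by simpa using h1)
      · exact absurd (e0 ▸ hmem) (by simpa using h0)
      · omega
    · -- no preferred card is available: every key is 6, min? is first-stable, so B returns x
      have hall : ∀ y ∈ x :: t, pvKeyB y = 6 := by
        intro y hy
        rw [pvKeyB_eq]
        split_ifs with e5 e4 e3 e2 e1 e0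
        · exact absurd (e5 ▸ hy) (by simpa using h5)
        · exact absurd (e4 ▸ hy) (by simpa using h4)
        · exact absurd (e3 ▸ hy) (by simpa using h3)
        · exact absurd (e2 ▸ hy) (by simpa using h2)
        · exact absurd (e1 ▸ hy) (by simpa using h1)
        · exact absurd (e0 ▸ hy) (by simpa using h0)
        · rfl
      have hx : PySem.List.min? (x :: t) pvKeyB = some x :=
        min?_cons_of_le pvKeyB x t (fun y hy => by
          rw [hall x (by simp), hall y (List.mem_cons_of_mem _ hy)])
      rw [hm] at hx
      cases hx
      simp [PySem.List.pyGet?, PySem.List.pyIdx?]
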